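-- pv_equiv track=rewrite | github.com/jano31415/codejam | codeforces/726_round_div2/probd.py | solve_cache
-- ===== SOURCE A (Python) =====
-- def solve_cache(N, primes):
--     winloss = [0]*(N+1)
--     for i in range(2, N+1):
--         if i in primes:
--             winloss[i]= 0
--             continue
--         for j in range(2,i):
--             if i%j == 0:
--                 if winloss[i-j] == 0:
--                     winloss[i] = 1
--                     break
--     return winloss
-- ===== SOURCE B (Python) =====
-- def solve_cache(N, primes):
--     prime_set = set(primes)
--     winloss = [0] * (N + 1)
--     for i in range(2, N + 1):
--         if i in prime_set:
--             continue
--         d = 2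
--         while d * d <= i:
--             if i % d == 0 and (winloss[i - d] == 0 or winloss[i - i // d] == 0):
--                 winloss[i] = 1
--                 break
--             d += 1
--     return winloss
-- ===== Notes on version B (the rewrite author's own statement) =====
-- stated objective: faster
-- what changed: Instead of scanning every j in range(2, i) for divisors, B enumerates only the actual divisors of i in pairs (d, i//d) with d*d <= i, and replaces the linear 'i in primes' list scan by a set built once.
import Mathlib
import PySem

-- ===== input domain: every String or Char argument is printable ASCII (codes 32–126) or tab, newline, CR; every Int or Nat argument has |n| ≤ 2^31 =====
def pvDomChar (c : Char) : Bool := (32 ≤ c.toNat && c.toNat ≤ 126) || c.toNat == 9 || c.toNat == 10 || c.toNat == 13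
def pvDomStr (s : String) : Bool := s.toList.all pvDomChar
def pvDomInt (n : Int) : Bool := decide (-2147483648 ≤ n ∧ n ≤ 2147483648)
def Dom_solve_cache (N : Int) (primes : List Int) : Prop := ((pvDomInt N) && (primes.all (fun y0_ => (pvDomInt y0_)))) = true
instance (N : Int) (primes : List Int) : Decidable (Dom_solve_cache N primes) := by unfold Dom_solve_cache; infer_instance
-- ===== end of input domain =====

-- B replaces A's inner scan over all j in range(2, i) by an enumeration of the actual
-- divisors of i in pairs (d, i // d) with d*d <= i (and skips via a prime set built once):
-- an asymptotically faster exact re-implementation (O(N*sqrt(N)) vs O(N^2)).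

-- ===== PORT A =====
-- loop body of A's 'for i in range(2, N+1)'; the inner 'for j ... break' only writes
-- winloss[i] = 1 once and reads only indices i - j < i, so it is exactly an 'any' over j.
def solveStepA (primes : List Int) (wl : List Int) (i : Int) : List Int :=
  if primes.contains i then wl.set i.toNat 0
  else if (PySem.List.pyRange 2 i 1).any (fun j =>
      PySem.Int.mod i j == 0 && PySem.List.pyGetD wl (i - j) 0 == 0)
    then wl.set i.toNat 1 else wl

def solve_cache (N : Int) (primes : List Int) : List Int :=
  (PySem.List.pyRange 2 (N + 1) 1).foldl (solveStepA primes) (List.replicate (N + 1).toNat 0)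

-- ===== PORT B =====
-- B's 'while d * d <= i' loop (d starts at 2); it only writes winloss[i] = 1 once and
-- breaks, so it is ported as the boolean it computes.
def altScan (i : Int) (wl : List Int) (d : Nat) : Bool :=
  if h : (d : Int) * d ≤ i then
    if PySem.Int.mod i d == 0 &&
       (PySem.List.pyGetD wl (i - d) 0 == 0 ||
        PySem.List.pyGetD wl (i - PySem.Int.floordiv i d) 0 == 0)
    then true
    else altScan i wl (d + 1)
  else false
termination_by i.toNat + 1 - d
decreasing_by
  rcases Nat.eq_zero_or_pos d with h0 | h0
  · subst h0; simp at h; omega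
  · have h1 : (d : Int) ≤ (d : Int) * d := le_mul_of_one_le_right (by positivity) (by exact_mod_cast h0)
    have h2 : (d : Int) ≤ i := le_trans h1 h
    omega

-- loop body of B's 'for i in range(2, N+1)'
def solveStepB (primeSet : PySem.Set Int) (wl : List Int) (i : Int) : List Int :=
  if PySem.Set.contains primeSet i then wl
  else if altScan i wl 2 then wl.set i.toNat 1 else wl

def solve_cache_alt (N : Int) (primes : List Int) : List Int :=
  (PySem.List.pyRange 2 (N + 1) 1).foldl (solveStepB (PySem.Set.ofList primes))
    (List.replicate (N + 1).toNat 0)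

-- ===== PRECONDITION & SPEC =====
def Spec_solve_cache (N : Int) (primes : List Int) (out : List Int) : Prop := out = solve_cache_alt N primes
instance (N : Int) (primes : List Int) (out : List Int) : Decidable (Spec_solve_cache N primes out) := by unfold Spec_solve_cache; infer_instance

-- ===== CLAIM (what is proved, stated in full; the proofs are below) =====
def Claim_equal_solve_cache : Prop := ∀ (N : Int) (primes : List Int), Dom_solve_cache N primes → Spec_solve_cache N primes (solve_cache N primes)

-- ===== LEMMAS AND PROOFS =====

-- setting an entry that is already 0 to 0 is a no-op
theorem set_zero_self (wl : List Int) (n : Nat) (h : wl[n]? = some 0) : wl.set n 0 = wl := by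
  have hn : n < wl.length := by
    by_contra hc
    simp [List.getElem?_eq_none (by omega : wl.length ≤ n)] at h
  apply List.ext_getElem (by simp)
  intro k hk _
  rcases eq_or_ne k n with rfl | hne
  · simp_all
  · rw [List.getElem_set_ne (by omega)]

-- altScan d = some divisor e ≥ d with e*e ≤ i whose pair check fires
theorem altScan_iff (i : Int) (wl : List Int) (d : Nat) :
    altScan i wl d = true ↔ ∃ e : Nat, d ≤ e ∧ (e : Int) * e ≤ i ∧ PySem.Int.mod i e = 0 ∧
      (PySem.List.pyGetD wl (i - e) 0 = 0 ∨ PySem.List.pyGetD wl (i - PySem.Int.floordiv i e) 0 = 0) := by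
  fun_induction altScan i wl d with
  | case1 d h hcond =>
    simp only [Bool.and_eq_true, Bool.or_eq_true, beq_iff_eq] at hcond
    simp only [true_iff]
    exact ⟨d, le_refl d, h, hcond.1, by tauto⟩
  | case2 d h hcond ih =>
    simp only [Bool.and_eq_true, Bool.or_eq_true, beq_iff_eq] at hcond
    rw [ih]
    constructor
    · rintro ⟨e, he, h1, h2, h3⟩; exact ⟨e, by omega, h1, h2, h3⟩
    · rintro ⟨e, he, h1, h2, h3⟩
      refine ⟨e, ?_, h1, h2, h3⟩
      rcases Nat.eq_or_lt_of_le he with rfl | hlt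
      · exact absurd ⟨h2, by tauto⟩ hcond
      · omega
  | case3 d h =>
    simp only [Bool.false_eq_true, false_iff]
    rintro ⟨e, he, h1, h2, h3⟩
    apply h
    calc (d:Int) * d ≤ (e:Int) * e := by
          have : (d:Int) ≤ e := by exact_mod_cast he
          nlinarith [Int.natCast_nonneg d, Int.natCast_nonneg e]
      _ ≤ i := h1

-- every proper divisor j ∈ [2, i) of i is hit through a pair (e, i // e) with e*e ≤ i, and conversely
theorem divisor_pair (i : Int) (hi : 2 ≤ i) (P : Int → Prop) :
    (∃ e : Nat, 2 ≤ e ∧ (e : Int) * e ≤ i ∧ PySem.Int.mod i e = 0 ∧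
        (P e ∨ P (PySem.Int.floordiv i e)))
    ↔ (∃ j : Int, 2 ≤ j ∧ j < i ∧ PySem.Int.mod i j = 0 ∧ P j) := by
  constructor
  · rintro ⟨e, he2, hee, hmod, hP⟩
    have hE2 : (2:Int) ≤ (e:Int) := by exact_mod_cast he2
    have hdvd : (e:Int) ∣ i := (PySem.Int.mod_eq_zero_iff_dvd i e).mp hmod
    have hEi : (e:Int) < i := by nlinarith
    rcases hP with hP | hP
    · exact ⟨e, hE2, hEi, hmod, hP⟩
    · set q := PySem.Int.floordiv i e with hqdef
      have hq : q = i / (e:Int) := by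
        rw [hqdef, PySem.Int.floordiv_eq_ediv_of_pos (by omega)]
      have hqe : q * e = i := by rw [hq]; exact Int.ediv_mul_cancel hdvd
      have hq2 : 2 ≤ q := by nlinarith
      have hqi : q < i := by nlinarith
      have hqdvd : q ∣ i := ⟨e, hqe.symm⟩
      exact ⟨q, hq2, hqi, (PySem.Int.mod_eq_zero_iff_dvd i q).mpr hqdvd, hP⟩
  · rintro ⟨j, hj2, hji, hmod, hP⟩
    have hdvd : j ∣ i := (PySem.Int.mod_eq_zero_iff_dvd i j).mp hmod
    have hq : (i / j) * j = i := Int.ediv_mul_cancel hdvd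
    set q := i / j with hqdef
    have hq1 : 1 ≤ q := by
      rcases hdvd with ⟨c, hc⟩
      by_contra hc1
      push Not at hc1
      nlinarith
    have hq2 : 2 ≤ q := by
      rcases eq_or_lt_of_le hq1 with h1 | h1
      · exfalso; rw [← h1] at hq; omega
      · omega
    by_cases hcmp : j * j ≤ i
    · refine ⟨j.toNat, ?_, ?_, ?_, Or.inl ?_⟩
      · omega
      · rw [Int.toNat_of_nonneg (by omega)]; exact hcmp
      · rw [Int.toNat_of_nonneg (by omega)]; exact hmod
      · rw [Int.toNat_of_nonneg (by omega)]; exact hP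
    · push Not at hcmp
      have hqj : q < j := by nlinarith
      refine ⟨q.toNat, ?_, ?_, ?_, Or.inr ?_⟩
      · omega
      · rw [Int.toNat_of_nonneg (by omega)]; nlinarith
      · rw [Int.toNat_of_nonneg (by omega)]
        exact (PySem.Int.mod_eq_zero_iff_dvd i q).mpr ⟨j, by omega⟩
      · rw [Int.toNat_of_nonneg (by omega)]
        have hfd : PySem.Int.floordiv i q = j := by
          rw [PySem.Int.floordiv_eq_ediv_of_pos (by omega)]
          have hij : i = q * j := by omega
          rw [hij, Int.mul_ediv_cancel_left _ (by omega)]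
        rw [hfd]; exact hP

-- the two loop bodies agree whenever the entry at i is still 0
theorem step_eq (primes : List Int) (wl : List Int) (i : Int) (hi : 2 ≤ i)
    (h0 : wl[i.toNat]? = some 0) :
    solveStepA primes wl i = solveStepB (PySem.Set.ofList primes) wl i := by
  have hcont : primes.contains i = PySem.Set.contains (PySem.Set.ofList primes) i := by
    simp [PySem.Set.contains, PySem.Set.mem_ofList]
  have hany : ((PySem.List.pyRange 2 i 1).any (fun j =>
      PySem.Int.mod i j == 0 && PySem.List.pyGetD wl (i - j) 0 == 0)) = altScan i wl 2 := by
    rw [Bool.eq_iff_iff, List.any_eq_true, altScan_iff,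
      divisor_pair i hi (fun j => PySem.List.pyGetD wl (i - j) 0 = 0)]
    constructor
    · rintro ⟨j, hjmem, hcond⟩
      rw [PySem.List.mem_pyRange_one] at hjmem
      simp only [Bool.and_eq_true, beq_iff_eq] at hcond
      exact ⟨j, hjmem.1, hjmem.2, hcond.1, hcond.2⟩
    · rintro ⟨j, h1, h2, h3, h4⟩
      refine ⟨j, PySem.List.mem_pyRange_one.mpr ⟨h1, h2⟩, ?_⟩
      simp only [Bool.and_eq_true, beq_iff_eq]
      exact ⟨h3, h4⟩
  unfold solveStepA solveStepB
  rw [hcont, hany]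
  split_ifs with h1 h2
  · exact set_zero_self wl i.toNat h0
  · rfl
  · rfl

-- the step at i does not disturb entries at indices k > i
theorem step_preserves (primes : List Int) (wl : List Int) (i k : Int) (hi : 2 ≤ i) (hik : i < k)
    (hk : wl[k.toNat]? = some 0) :
    (solveStepB (PySem.Set.ofList primes) wl i)[k.toNat]? = some 0 := by
  unfold solveStepB
  split_ifs
  · exact hk
  · rw [List.getElem?_set_ne (by omega)]; exact hk
  · exact hk

-- main loop: both folds over range(a, b) agree while all not-yet-visited entries are 0
theorem fold_eq (primes : List Int) (b : Int) :
    ∀ (n : Nat) (a : Int) (wl : List Int), (b - a).toNat = n → 2 ≤ a →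
    (∀ k : Int, a ≤ k → k < b → wl[k.toNat]? = some 0) →
    (PySem.List.pyRange a b 1).foldl (solveStepA primes) wl =
      (PySem.List.pyRange a b 1).foldl (solveStepB (PySem.Set.ofList primes)) wl := by
  intro n
  induction n with
  | zero =>
    intro a wl hn _ _
    rw [PySem.List.pyRange_one]
    have : (b - a).toNat = 0 := hn
    rw [this]
    rfl
  | succ m ih =>
    intro a wl hn ha hinv
    have hab : a < b := by omega
    rw [PySem.List.pyRange_one_cons hab]
    simp only [List.foldl_cons]
    have h0 : wl[a.toNat]? = some 0 := hinv a (le_refl a) hab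
    rw [step_eq primes wl a ha h0]
    exact ih (a + 1) (solveStepB (PySem.Set.ofList primes) wl a) (by omega) (by omega)
      (fun k hk1 hk2 => step_preserves primes wl a k ha (by omega) (hinv k (by omega) hk2))

-- ===== VERDICT (by name: the statement is the Claim_ definition above) =====
theorem solve_cache_spec : Claim_equal_solve_cache := by
  intro N primes _
  unfold Spec_solve_cache solve_cache solve_cache_alt
  apply fold_eq primes (N + 1) (N + 1 - 2).toNat 2 _ rfl (le_refl 2)
  intro k hk1 hk2
  rw [List.getElem?_replicate]
  simp only [if_pos (by omega : k.toNat < (N + 1).toNat)]
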